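-- pv_equiv track=rewrite | github.com/vonguyenhao/Coding4fun | Love_prediction_basic.py | prediction_love
-- ===== SOURCE A (Python) =====
-- def prediction_love(male, female):
--     male = male.lower()
--     female = female.lower()
--     count = 0
--     for words in range(ord('a'), ord('z')+1):
--         if (chr(words) in male) and (chr(words) in female):
--             count = count + 1
--
--     if count == 0:
--         result = "Nope dude, there is no chance at all, you will live with dogs and cats and die alone"
--     elif count < 4:
--         result = "Just friend, bruh, you will be in the infinity friendzone"
--     else:
--         result = "Congratulation you son of bitch, but don't feel so lucky because she will cheat on you"
--     return result
-- ===== SOURCE B (Python) =====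
-- def prediction_love(male, female):
--     common = {c for c in male.lower() if 'a' <= c <= 'z'} & set(female.lower())
--     count = len(common)
--     if count == 0:
--         return "Nope dude, there is no chance at all, you will live with dogs and cats and die alone"
--     if count < 4:
--         return "Just friend, bruh, you will be in the infinity friendzone"
--     return "Congratulation you son of bitch, but don't feel so lucky because she will cheat on you"
-- ===== Notes on version B (the rewrite author's own statement) =====
-- stated objective: idiomatic
-- what changed: Replaces the 26-iteration alphabet loop with substring tests against both strings by a direct set intersection: the set of lowercase letters occurring in male.lower() intersected with the set of characters of female.lower(), taking its size.
import Mathlib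
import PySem

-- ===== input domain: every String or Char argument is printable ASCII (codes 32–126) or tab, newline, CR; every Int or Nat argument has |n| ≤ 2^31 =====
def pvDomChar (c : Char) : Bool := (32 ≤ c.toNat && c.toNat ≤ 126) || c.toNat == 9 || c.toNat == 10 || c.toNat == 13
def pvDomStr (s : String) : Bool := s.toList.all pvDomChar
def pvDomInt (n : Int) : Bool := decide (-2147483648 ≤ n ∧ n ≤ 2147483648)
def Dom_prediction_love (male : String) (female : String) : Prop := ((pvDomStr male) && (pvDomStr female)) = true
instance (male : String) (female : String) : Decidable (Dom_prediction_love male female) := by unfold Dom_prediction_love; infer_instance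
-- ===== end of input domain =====

-- B replaces A's 26-iteration alphabet loop (substring test per letter) by intersecting
-- the set of lowercase letters of male.lower() with the character set of female.lower().

-- ===== PORT A =====
def prediction_love (male : String) (female : String) : String :=
  let m := PySem.Str.lower male
  let f := PySem.Str.lower female
  let count : Int := (PySem.List.pyRange 97 123 1).foldl
    (fun count w =>
      if PySem.Str.isIn (String.ofList [Char.ofNat w.toNat]) m
          && PySem.Str.isIn (String.ofList [Char.ofNat w.toNat]) f
      then count + 1 else count) 0
  if count = 0 then
    "Nope dude, there is no chance at all, you will live with dogs and cats and die alone"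
  else if count < 4 then
    "Just friend, bruh, you will be in the infinity friendzone"
  else
    "Congratulation you son of bitch, but don't feel so lucky because she will cheat on you"

-- ===== PORT B =====
def prediction_love_alt (male : String) (female : String) : String :=
  let common : PySem.Set Char :=
    PySem.Set.inter
      (PySem.Set.ofList ((PySem.Str.lower male).toList.filter (fun c => decide ('a' ≤ c ∧ c ≤ 'z'))))
      (PySem.Set.ofList (PySem.Str.lower female).toList)
  let count := common.length
  if count = 0 then
    "Nope dude, there is no chance at all, you will live with dogs and cats and die alone"
  else if count < 4 then
    "Just friend, bruh, you will be in the infinity friendzone"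
  else
    "Congratulation you son of bitch, but don't feel so lucky because she will cheat on you"

-- ===== PRECONDITION & SPEC =====
def Spec_prediction_love (male : String) (female : String) (out : String) : Prop := out = prediction_love_alt male female
instance (male : String) (female : String) (out : String) : Decidable (Spec_prediction_love male female out) := by unfold Spec_prediction_love; infer_instance

-- ===== CLAIM (what is proved, stated in full; the proofs are below) =====
def Claim_equal_prediction_love : Prop := ∀ (male : String) (female : String), Dom_prediction_love male female → Spec_prediction_love male female (prediction_love male female)

-- ===== LEMMAS AND PROOFS =====

-- A counting loop is countP
theorem pv_foldl_count {α : Type} (p : α → Bool) (l : List α) (n : Int) :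
    l.foldl (fun c x => if p x then c + 1 else c) n = n + (l.countP p : Int) := by
  induction l generalizing n with
  | nil => simp
  | cons a t ih =>
    simp only [List.foldl_cons, List.countP_cons, ih]
    by_cases h : p a = true <;> simp [h] <;> push_cast <;> ring

-- the alphabet as a char list
def pvAB : List Char := ['a','b','c','d','e','f','g','h','i','j','k','l','m','n','o','p','q','r','s','t','u','v','w','x','y','z']

theorem pv_range_eq : PySem.List.pyRange 97 123 1 = pvAB.map (fun c => (c.toNat : Int)) := by
  decide

theorem pv_singleton_infix {c : Char} {l : List Char} : [c] <:+: l ↔ c ∈ l := by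
  constructor
  · intro h; exact h.mem (List.mem_singleton_self c)
  · intro h
    obtain ⟨s, t, rfl⟩ := List.append_of_mem h
    exact ⟨s, t, by simp⟩

theorem pv_isIn_singleton (c : Char) (s : String) :
    PySem.Str.isIn (String.ofList [c]) s = true ↔ c ∈ s.toList := by
  rw [PySem.Str.isIn_iff_infix, String.toList_ofList]
  exact pv_singleton_infix

theorem pv_mem_AB {c : Char} : c ∈ pvAB ↔ ('a' ≤ c ∧ c ≤ 'z') := by
  have h1 : ('a' ≤ c ↔ 97 ≤ c.toNat) := by rw [Char.le_def, UInt32.le_iff_toNat_le]; rfl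
  have h2 : (c ≤ 'z' ↔ c.toNat ≤ 122) := by rw [Char.le_def, UInt32.le_iff_toNat_le]; rfl
  rw [h1, h2]
  constructor
  · intro h; fin_cases h <;> decide
  · rintro ⟨ha, hb⟩
    have hc : c = Char.ofNat c.toNat := by simp
    rw [hc]
    set n := c.toNat with hn
    interval_cases n <;> decide

set_option maxHeartbeats 1000000 in
theorem pv_count_eq (male female : String) :
    ((PySem.List.pyRange 97 123 1).countP
      (fun w =>
        PySem.Str.isIn (String.ofList [Char.ofNat w.toNat]) (PySem.Str.lower male)
          && PySem.Str.isIn (String.ofList [Char.ofNat w.toNat]) (PySem.Str.lower female)))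
    = (PySem.Set.inter
        (PySem.Set.ofList ((PySem.Str.lower male).toList.filter (fun c => decide ('a' ≤ c ∧ c ≤ 'z'))))
        (PySem.Set.ofList (PySem.Str.lower female).toList)).length := by
  rw [pv_range_eq, List.countP_map, List.countP_eq_length_filter]
  apply List.Perm.length_eq
  have hn1 : (pvAB.filter
      ((fun w => PySem.Str.isIn (String.ofList [Char.ofNat w.toNat]) (PySem.Str.lower male)
          && PySem.Str.isIn (String.ofList [Char.ofNat w.toNat]) (PySem.Str.lower female))
        ∘ fun c => ((c.toNat : Int)))).Nodup := List.Nodup.filter _ (by decide)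
  have hn2 : (PySem.Set.inter
        (PySem.Set.ofList ((PySem.Str.lower male).toList.filter (fun c => decide ('a' ≤ c ∧ c ≤ 'z'))))
        (PySem.Set.ofList (PySem.Str.lower female).toList)).Nodup :=
    PySem.Set.nodup_inter _ _ (PySem.Set.nodup_ofList _)
  refine (List.perm_ext_iff_of_nodup hn1 hn2).mpr ?_
  intro c
  simp only [List.mem_filter, PySem.Set.mem_inter, PySem.Set.mem_ofList, Function.comp,
    Int.toNat_natCast, Char.ofNat_toNat, Bool.and_eq_true, pv_isIn_singleton, pv_mem_AB,
    decide_eq_true_eq]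
  tauto

theorem prediction_love_spec : Claim_equal_prediction_love := by
  intro male female _
  unfold Spec_prediction_love prediction_love prediction_love_alt
  dsimp only
  rw [pv_foldl_count, pv_count_eq]
  set n := (PySem.Set.inter
        (PySem.Set.ofList ((PySem.Str.lower male).toList.filter (fun c => decide ('a' ≤ c ∧ c ≤ 'z'))))
        (PySem.Set.ofList (PySem.Str.lower female).toList)).length with hn
  split_ifs with h1 h2 h3 h4 h5 <;> first | rfl | omega
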